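-- pv_equiv track=rewrite | github.com/orabi55/AI-Based-Analog-Layout-Automation | ai_agent/finger_grouping.py | _generate_interdig_sequence
-- ===== SOURCE A (Python) =====
-- def _generate_interdig_sequence(
--     nf_a: int,
--     nf_b: int,
--     pattern: str
-- ) -> list[str]:
--     """
--     Generate interdigitation label sequence.
--
--     Args:
--         nf_a:    number of fingers in device A
--         nf_b:    number of fingers in device B
--         pattern: "ABAB" or "ABBA"
--
--     Returns:
--         list of "A" and "B" labels
--     """
--     if pattern == "ABAB":
--         seq: list[str] = []
--         for i in range(max(nf_a, nf_b)):
--             if i < nf_a: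
--                 seq.append("A")
--             if i < nf_b:
--                 seq.append("B")
--         return seq
--
--     elif pattern == "ABBA":
--         half_a = nf_a // 2
--         return (
--             ["A"] * half_a
--             + ["B"] * nf_b
--             + ["A"] * (nf_a - half_a)
--         )
--
--     else:
--         return _generate_interdig_sequence(nf_a, nf_b, "ABAB")
-- ===== SOURCE B (Python) =====
-- def _generate_interdig_sequence(
--     nf_a: int,
--     nf_b: int,
--     pattern: str
-- ) -> list[str]:
--     """Interdigitation labels: closed-form concatenation instead of an index loop."""
--     if pattern == "ABBA":
--         half_a = nf_a // 2
--         return ["A"] * half_a + ["B"] * nf_b + ["A"] * (nf_a - half_a)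
--     # ABAB (and any unrecognised pattern falls back to ABAB, as in the original)
--     a = max(0, nf_a)
--     b = max(0, nf_b)
--     m = min(a, b)
--     return ["A", "B"] * m + ["A"] * (a - m) + ["B"] * (b - m)
-- ===== Notes on version B (the rewrite author's own statement) =====
-- stated objective: simpler
-- what changed: The ABAB branch's per-index loop with two conditional appends is replaced by a closed-form concatenation ['A','B']*min(a,b) plus the leftover run of the longer device, with counts clamped at 0.
import Mathlib
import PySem

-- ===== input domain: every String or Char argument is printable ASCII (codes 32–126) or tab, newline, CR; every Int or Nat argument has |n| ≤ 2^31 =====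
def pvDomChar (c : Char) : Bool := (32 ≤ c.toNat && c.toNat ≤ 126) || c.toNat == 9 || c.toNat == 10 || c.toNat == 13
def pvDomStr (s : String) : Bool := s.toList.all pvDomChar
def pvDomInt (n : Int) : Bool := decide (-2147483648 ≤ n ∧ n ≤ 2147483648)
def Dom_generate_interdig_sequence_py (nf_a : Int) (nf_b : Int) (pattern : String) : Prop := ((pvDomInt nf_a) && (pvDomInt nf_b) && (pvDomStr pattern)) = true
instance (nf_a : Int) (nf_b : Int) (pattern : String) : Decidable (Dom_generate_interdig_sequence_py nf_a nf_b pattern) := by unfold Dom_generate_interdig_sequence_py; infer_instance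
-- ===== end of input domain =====

-- B replaces the ABAB index loop by a closed-form concatenation (objective: simpler).

-- ===== PORT A =====
-- the ABAB branch's loop: for i in range(max(nf_a, nf_b)): if i < nf_a: append "A"; if i < nf_b: append "B"
-- (A's else-branch recursive call _generate_interdig_sequence(nf_a, nf_b, "ABAB") immediately takes the
--  ABAB branch, so it is ported as this same loop)
def pvAbabLoop (nf_a : Int) (nf_b : Int) : List String :=
  (PySem.List.pyRange 0 (max nf_a nf_b) 1).foldl
    (fun seq i =>
      let seq := if i < nf_a then seq ++ ["A"] else seq
      if i < nf_b then seq ++ ["B"] else seq) []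

def generate_interdig_sequence_py (nf_a : Int) (nf_b : Int) (pattern : String) : List String :=
  if pattern == "ABAB" then
    pvAbabLoop nf_a nf_b
  else if pattern == "ABBA" then
    let half_a := PySem.Int.floordiv nf_a 2
    List.replicate half_a.toNat "A" ++ List.replicate nf_b.toNat "B"
      ++ List.replicate (nf_a - half_a).toNat "A"
  else
    pvAbabLoop nf_a nf_b

-- ===== PORT B =====
def generate_interdig_sequence_py_alt (nf_a : Int) (nf_b : Int) (pattern : String) : List String :=
  if pattern == "ABBA" then
    let half_a := PySem.Int.floordiv nf_a 2
    List.replicate half_a.toNat "A" ++ List.replicate nf_b.toNat "B"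
      ++ List.replicate (nf_a - half_a).toNat "A"
  else
    let a := max 0 nf_a
    let b := max 0 nf_b
    let m := min a b
    (List.replicate m.toNat (["A", "B"] : List String)).flatten
      ++ List.replicate (a - m).toNat "A" ++ List.replicate (b - m).toNat "B"

-- ===== PRECONDITION & SPEC =====
def Spec_generate_interdig_sequence_py (nf_a : Int) (nf_b : Int) (pattern : String) (out : List String) : Prop := out = generate_interdig_sequence_py_alt nf_a nf_b pattern
instance (nf_a : Int) (nf_b : Int) (pattern : String) (out : List String) : Decidable (Spec_generate_interdig_sequence_py nf_a nf_b pattern out) := by unfold Spec_generate_interdig_sequence_py; infer_instance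

-- ===== CLAIM (what is proved, stated in full; the proofs are below) =====
def Claim_equal_generate_interdig_sequence_py : Prop := ∀ (nf_a : Int) (nf_b : Int) (pattern : String), Dom_generate_interdig_sequence_py nf_a nf_b pattern → Spec_generate_interdig_sequence_py nf_a nf_b pattern (generate_interdig_sequence_py nf_a nf_b pattern)

-- ===== LEMMAS AND PROOFS =====

-- closed form of the interleaving on Nat counts
theorem pvRunFlat (s : String) : ∀ n m : Nat, n ≤ m →
    (List.range n).flatMap (fun k => if k < m then [s] else []) = List.replicate n s := by
  intro n
  induction n with
  | zero => intro m _; simp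
  | succ n ih =>
      intro m hm
      rw [List.range_succ, List.flatMap_append, ih m (by omega), List.replicate_succ']
      simp [Nat.lt_of_succ_le hm]

theorem pvInterleave_closed (a b : Nat) :
    (List.range (max a b)).flatMap
        (fun k => (if k < a then ["A"] else ([] : List String)) ++ (if k < b then ["B"] else []))
      = (List.replicate (min a b) (["A", "B"] : List String)).flatten
          ++ List.replicate (a - min a b) "A" ++ List.replicate (b - min a b) "B" := by
  induction a generalizing b with
  | zero =>
      have hfun : (fun k => (if k < 0 then ["A"] else ([] : List String)) ++ (if k < b then ["B"] else []))
          = (fun k => if k < b then ["B"] else ([] : List String)) := by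
        funext k; simp
      rw [Nat.max_comm, Nat.max_zero, hfun, pvRunFlat "B" b b le_rfl]
      simp
  | succ a iha =>
      cases b with
      | zero =>
          have hfun : (fun k => (if k < a + 1 then ["A"] else ([] : List String)) ++ (if k < 0 then ["B"] else []))
              = (fun k => if k < a + 1 then ["A"] else ([] : List String)) := by
            funext k; simp
          rw [Nat.max_zero, hfun, pvRunFlat "A" (a + 1) (a + 1) le_rfl]
          simp
      | succ b =>
          have hmax : max (a + 1) (b + 1) = max a b + 1 := by omega
          rw [hmax, List.range_succ_eq_map, List.flatMap_cons, List.flatMap_map]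
          simp only [Nat.succ_eq_add_one, Nat.add_lt_add_iff_right]
          rw [iha b]
          have hmin : min (a + 1) (b + 1) = min a b + 1 := by omega
          rw [hmin, List.replicate_succ, List.flatten_cons]
          have h1 : a + 1 - (min a b + 1) = a - min a b := by omega
          have h2 : b + 1 - (min a b + 1) = b - min a b := by omega
          rw [h1, h2]
          simp

-- the foldl step appends a per-index chunk, so the loop is a flatMap
theorem pvAbabLoop_flatMap (nf_a nf_b : Int) :
    pvAbabLoop nf_a nf_b
      = (PySem.List.pyRange 0 (max nf_a nf_b) 1).flatMap
          (fun i => (if i < nf_a then ["A"] else []) ++ (if i < nf_b then ["B"] else [])) := by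
  unfold pvAbabLoop
  rw [show (fun (seq : List String) (i : Int) =>
        let seq' := if i < nf_a then seq ++ ["A"] else seq
        if i < nf_b then seq' ++ ["B"] else seq')
      = (fun seq i => seq ++ ((if i < nf_a then ["A"] else []) ++ (if i < nf_b then ["B"] else [])))
      from by funext seq i; by_cases h1 : i < nf_a <;> by_cases h2 : i < nf_b <;> simp [h1, h2]]
  rw [PySem.List.foldl_append_eq_flatMap]
  simp

theorem pvAbabLoop_closed (nf_a nf_b : Int) :
    pvAbabLoop nf_a nf_b
      = (List.replicate (min (max 0 nf_a) (max 0 nf_b)).toNat (["A", "B"] : List String)).flatten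
          ++ List.replicate (max 0 nf_a - min (max 0 nf_a) (max 0 nf_b)).toNat "A"
          ++ List.replicate (max 0 nf_b - min (max 0 nf_a) (max 0 nf_b)).toNat "B" := by
  rw [pvAbabLoop_flatMap]
  rcases le_or_gt (max nf_a nf_b) 0 with h | h
  · rw [PySem.List.pyRange_one_eq_nil h]
    have ha : nf_a ≤ 0 := le_trans (le_max_left _ _) h
    have hb : nf_b ≤ 0 := le_trans (le_max_right _ _) h
    have : (min (max 0 nf_a) (max 0 nf_b)).toNat = 0 := by omega
    have h2 : (max 0 nf_a - min (max 0 nf_a) (max 0 nf_b)).toNat = 0 := by omega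
    have h3 : (max 0 nf_b - min (max 0 nf_a) (max 0 nf_b)).toNat = 0 := by omega
    simp [this, h2, h3]
  · have hN : max nf_a nf_b = ((max nf_a nf_b).toNat : Int) := by omega
    rw [hN, PySem.List.pyRange_zero_natCast, List.flatMap_map]
    have hfun : (fun a : Nat => (if (a : Int) < nf_a then ["A"] else ([] : List String))
          ++ if (a : Int) < nf_b then ["B"] else [])
        = (fun k : Nat => (if k < nf_a.toNat then ["A"] else ([] : List String))
          ++ if k < nf_b.toNat then ["B"] else []) := by
      funext k
      have e1 : ((k : Int) < nf_a) ↔ (k < nf_a.toNat) := by omega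
      have e2 : ((k : Int) < nf_b) ↔ (k < nf_b.toNat) := by omega
      simp only [e1, e2]
    rw [hfun]
    have hmax : (max nf_a nf_b).toNat = max nf_a.toNat nf_b.toNat := by omega
    rw [hmax, pvInterleave_closed]
    have e1 : (min (max 0 nf_a) (max 0 nf_b)).toNat = min nf_a.toNat nf_b.toNat := by omega
    have e2 : (max 0 nf_a - min (max 0 nf_a) (max 0 nf_b)).toNat = nf_a.toNat - min nf_a.toNat nf_b.toNat := by omega
    have e3 : (max 0 nf_b - min (max 0 nf_a) (max 0 nf_b)).toNat = nf_b.toNat - min nf_a.toNat nf_b.toNat := by omega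
    rw [e1, e2, e3]

-- ===== VERDICT (by name: the statement is the Claim_ definition above) =====
theorem generate_interdig_sequence_py_spec : Claim_equal_generate_interdig_sequence_py := by
  intro nf_a nf_b pattern _
  unfold Spec_generate_interdig_sequence_py generate_interdig_sequence_py generate_interdig_sequence_py_alt
  by_cases hba : pattern = "ABBA"
  · subst hba; simp
  · by_cases hab : pattern = "ABAB" <;>
      simp [hab, hba, pvAbabLoop_closed]
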